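-- pv_equiv track=rewrite | github.com/ul1234/test_tool | proxy.py | _platform_issue
-- ===== SOURCE A (Python) =====
-- def _platform_issue(run_info):
--     platform_msg = [r'The RF hardware fitted does not support the specified carrier frequencies',
--                     r'Capture_IQ_CaptMem: ERROR',
--                     r'FAIL: Data Captured',
--                     r'Socket Error : [Errno 10060] A connection attempt failed']
--     for info in run_info:
--         for msg in platform_msg:
--             if info.find(msg) >= 0:
--                 return True
--     return False
-- ===== SOURCE B (Python) =====
-- def _platform_issue(run_info):
--     platform_msg = [r'The RF hardware fitted does not support the specified carrier frequencies',
--                     r'Capture_IQ_CaptMem: ERROR',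
--                     r'FAIL: Data Captured',
--                     r'Socket Error : [Errno 10060] A connection attempt failed']
--     # Sentinel-join reduction: no message contains '\n', so a message occurs in some
--     # line of run_info iff it occurs in the single '\n'-joined blob.
--     blob = '\n'.join(run_info)
--     return any(msg in blob for msg in platform_msg)
-- ===== Notes on version B (the rewrite author's own statement) =====
-- stated objective: faster
-- what changed: Replaces the per-line nested scan (for each line, try each message with .find) by a sentinel-join reduction: concatenate all lines into one '\n'-joined blob once and run a single C-level substring search per message over the blob (4 searches total instead of up to 4 per line of Python-level looping), correct because no platform message contains '\n' so no match can span a join boundary.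
import Mathlib
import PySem

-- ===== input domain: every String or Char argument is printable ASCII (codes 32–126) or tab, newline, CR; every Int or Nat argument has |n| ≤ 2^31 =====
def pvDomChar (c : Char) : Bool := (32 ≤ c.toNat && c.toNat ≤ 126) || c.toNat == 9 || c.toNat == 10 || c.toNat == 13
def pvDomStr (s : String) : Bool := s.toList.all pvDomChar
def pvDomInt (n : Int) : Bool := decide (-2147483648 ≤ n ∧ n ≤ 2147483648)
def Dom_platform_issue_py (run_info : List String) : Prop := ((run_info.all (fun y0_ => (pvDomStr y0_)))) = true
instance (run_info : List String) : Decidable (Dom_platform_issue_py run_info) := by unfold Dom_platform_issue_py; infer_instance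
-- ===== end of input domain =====

-- B replaces the per-line nested scan by a sentinel-join: one '\n'-joined blob searched once per
-- message (correct because no message contains '\n'); alternative algorithm, same result.

-- ===== PORT A =====
def pvPlatformMsgs : List String :=
  ["The RF hardware fitted does not support the specified carrier frequencies",
   "Capture_IQ_CaptMem: ERROR",
   "FAIL: Data Captured",
   "Socket Error : [Errno 10060] A connection attempt failed"]

-- outer early-return loop over run_info, inner loop over the messages, info.find(msg) >= 0
def platform_issue_py (run_info : List String) : Bool :=
  run_info.any (fun info => pvPlatformMsgs.any (fun msg => decide (0 ≤ PySem.Str.find info msg)))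

-- ===== PORT B =====
-- blob = '\n'.join(run_info); any(msg in blob for msg in platform_msg)
def platform_issue_py_alt (run_info : List String) : Bool :=
  let blob := PySem.Str.join "\n" run_info
  pvPlatformMsgs.any (fun msg => PySem.Str.isIn msg blob)

-- ===== PRECONDITION & SPEC =====
def Spec_platform_issue_py (run_info : List String) (out : Bool) : Prop := out = platform_issue_py_alt run_info
instance (run_info : List String) (out : Bool) : Decidable (Spec_platform_issue_py run_info out) := by unfold Spec_platform_issue_py; infer_instance

-- ===== CLAIM (what is proved, stated in full; the proofs are below) =====
def Claim_equal_platform_issue_py : Prop := ∀ (run_info : List String), Dom_platform_issue_py run_info → Spec_platform_issue_py run_info (platform_issue_py run_info)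

-- ===== LEMMAS AND PROOFS =====

-- a prefix of u ++ c :: v avoiding c is a prefix of u
theorem pv_prefix_sep {α : Type} {sub u v : List α} {c : α}
    (hc : c ∉ sub) (h : sub <+: u ++ c :: v) : sub <+: u := by
  rcases h with ⟨t, ht⟩
  by_cases hlen : sub.length ≤ u.length
  · have : sub = (u ++ c :: v).take sub.length := by
      rw [← ht, List.take_append_of_le_length le_rfl, List.take_length]
    rw [List.take_append_of_le_length hlen] at this
    exact this ▸ List.take_prefix _ _
  · exfalso
    push Not at hlen
    have hu : u.length < (sub ++ t).length := by
      simp only [List.length_append]; omega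
    have h1 : (sub ++ t)[u.length]'hu = sub[u.length]'hlen := by
      exact List.getElem_append_left hlen
    have hu2 : u.length < (u ++ c :: v).length := by
      simp only [List.length_append, List.length_cons]; omega
    have h2 : (u ++ c :: v)[u.length]'hu2 = c := by
      rw [List.getElem_append_right le_rfl]; simp
    have : sub[u.length]'hlen = c := by
      rw [← h1]; simp only [ht]; exact h2
    exact hc (this ▸ List.getElem_mem _)

-- an occurrence avoiding the separator c lies wholly left or wholly right of it
theorem pv_infix_sep {α : Type} {sub : List α} {c : α} (hc : c ∉ sub) :
    ∀ u v : List α, (sub <:+: u ++ c :: v ↔ sub <:+: u ∨ sub <:+: v) := by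
  intro u v
  constructor
  · intro h
    induction u with
    | nil =>
      rcases List.infix_cons_iff.mp h with hp | hi
      · rcases sub with _ | ⟨a, l⟩
        · exact Or.inr List.nil_infix
        · rcases hp with ⟨t, ht⟩
          simp only [List.cons_append, List.cons.injEq] at ht
          exact absurd (ht.1 ▸ List.mem_cons_self) hc
      · exact Or.inr hi
    | cons x xs ih =>
      rcases List.infix_cons_iff.mp h with hp | hi
      · exact Or.inl (pv_prefix_sep hc hp).isInfix
      · rcases ih hi with h1 | h2
        · exact Or.inl (List.infix_cons h1)
        · exact Or.inr h2
  · rintro (h | h)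
    · exact h.trans (List.prefix_append u (c :: v)).isInfix
    · exact h.trans ((List.suffix_cons c v).trans (List.suffix_append u (c :: v))).isInfix

-- a c-free nonempty word occurs in the [c]-intercalation iff it occurs in some piece
theorem pv_infix_intercalate {α : Type} {sub : List α} {c : α}
    (hc : c ∉ sub) (hne : sub ≠ []) :
    ∀ css : List (List α), (sub <:+: List.intercalate [c] css ↔ ∃ cs ∈ css, sub <:+: cs) := by
  intro css
  induction css with
  | nil =>
    simp [List.intercalate, hne]
  | cons x rest ih =>
    rcases rest with _ | ⟨y, rest'⟩
    · simp [List.intercalate]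
    · have hstep : List.intercalate [c] (x :: y :: rest') =
        x ++ c :: List.intercalate [c] (y :: rest') := by
        simp [List.intercalate, List.intersperse]
      rw [hstep, pv_infix_sep hc, ih]
      constructor
      · rintro (h | ⟨cs, hm, hi⟩)
        · exact ⟨x, List.mem_cons_self, h⟩
        · exact ⟨cs, List.mem_cons_of_mem x hm, hi⟩
      · rintro ⟨cs, hm, hi⟩
        rcases List.mem_cons.mp hm with rfl | hm'
        · exact Or.inl hi
        · exact Or.inr ⟨cs, hm', hi⟩

theorem pv_msg_props {msg : String} (hm : msg ∈ pvPlatformMsgs) :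
    '\n' ∉ msg.toList ∧ msg.toList ≠ [] := by
  simp only [pvPlatformMsgs, List.mem_cons, List.not_mem_nil, or_false] at hm
  rcases hm with rfl | rfl | rfl | rfl <;> exact ⟨by decide, by decide⟩

-- ===== VERDICT (by name: the statement is the Claim_ definition above) =====
theorem platform_issue_py_spec : Claim_equal_platform_issue_py := by
  intro run_info _
  unfold Spec_platform_issue_py platform_issue_py platform_issue_py_alt
  rw [Bool.eq_iff_iff]
  simp only [List.any_eq_true, decide_eq_true_eq, PySem.Str.isIn_iff_infix,
    PySem.Str.find_nonneg_iff, PySem.Str.toList_join]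
  constructor
  · rintro ⟨info, hi, msg, hm, h⟩
    refine ⟨msg, hm, ?_⟩
    have ⟨hc, hne⟩ := pv_msg_props hm
    show msg.toList <:+: PySem.Chars.join "\n".toList (run_info.map String.toList)
    unfold PySem.Chars.join
    exact (pv_infix_intercalate hc hne _).mpr ⟨info.toList, List.mem_map_of_mem hi, h⟩
  · rintro ⟨msg, hm, h⟩
    have ⟨hc, hne⟩ := pv_msg_props hm
    have h' : msg.toList <:+: List.intercalate ['\n'] (run_info.map String.toList) := h
    rcases (pv_infix_intercalate hc hne _).mp h' with ⟨cs, hcs, hi⟩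
    rcases List.mem_map.mp hcs with ⟨info, hinfo, rfl⟩
    exact ⟨info, hinfo, msg, hm, hi⟩
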